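-- pv_equiv track=rewrite | github.com/854875058/chatcode-automation-skill | tools/chatcode_tool.py | build_manual_padding_block
-- ===== SOURCE A (Python) =====
-- def count_text_lines(content: str) -> int:
--     if not content:
--         return 0
--     return content.count("\n") + (0 if content.endswith("\n") else 1)
--
-- def sanitize_identifier(value: str) -> str:
--     chars = []
--     for char in value:
--         if char.isalnum():
--             chars.append(char.upper())
--         else:
--             chars.append("_")
--     sanitized = "".join(chars).strip("_")
--     return sanitized or "CHATCODE"
--
-- def build_manual_padding_block(file_stem: str, required_lines: int) -> tuple[str, int]:
--     if required_lines <= 0: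
--         return "", 0
--
--     symbol = f"__CHATCODE_MANUAL_PAD_{sanitize_identifier(file_stem)}"
--     function_name = f"getChatcodeManualPadSize{sanitize_identifier(file_stem).title().replace('_', '')}"
--     entries: list[str] = []
--
--     while True:
--         entries.append(f"  'manual_pad_{file_stem}_{len(entries) + 1:04d}',")
--         block_lines = [
--             "",
--             f"export const {symbol} = [",
--             *entries,
--             "];",
--             "",
--             f"export function {function_name}() {{",
--             f"  return {symbol}.length;",
--             "}",
--         ]
--         block = "\n".join(block_lines)
--         block_line_count = count_text_lines(block)
--         if block_line_count >= required_lines: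
--             return block, block_line_count
-- ===== SOURCE B (Python) =====
-- def count_text_lines(content: str) -> int:
--     if not content:
--         return 0
--     return content.count("\n") + (0 if content.endswith("\n") else 1)
--
-- def sanitize_identifier(value: str) -> str:
--     chars = []
--     for char in value:
--         if char.isalnum():
--             chars.append(char.upper())
--         else:
--             chars.append("_")
--     sanitized = "".join(chars).strip("_")
--     return sanitized or "CHATCODE"
--
-- def build_manual_padding_block(file_stem: str, required_lines: int) -> tuple[str, int]:
--     if required_lines <= 0:
--         return "", 0
--     ident = sanitize_identifier(file_stem)
--     symbol = f"__CHATCODE_MANUAL_PAD_{ident}"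
--     function_name = f"getChatcodeManualPadSize{ident.title().replace('_', '')}"
--     # each entry line spans 1 + (newlines embedded via file_stem) text lines
--     per = file_stem.count("\n") + 1
--     k = max(1, -((7 - required_lines) // per))  # smallest k >= 1 with 7 + k*per >= required_lines
--     entries = [f"  'manual_pad_{file_stem}_{i:04d}'," for i in range(1, k + 1)]
--     block = "\n".join(
--         [
--             "",
--             f"export const {symbol} = [",
--             *entries,
--             "];",
--             "",
--             f"export function {function_name}() {{",
--             f"  return {symbol}.length;",
--             "}",
--         ]
--     )
--     return block, 7 + k * per
-- ===== Notes on version B (the rewrite author's own statement) =====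
-- stated objective: faster
-- what changed: B computes the needed entry count k directly as max(1, ceil((required_lines-7)/lines_per_entry)) and builds the padding block once, instead of A's loop that appends one entry at a time and re-joins and re-counts the whole block on every iteration.
import Mathlib
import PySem

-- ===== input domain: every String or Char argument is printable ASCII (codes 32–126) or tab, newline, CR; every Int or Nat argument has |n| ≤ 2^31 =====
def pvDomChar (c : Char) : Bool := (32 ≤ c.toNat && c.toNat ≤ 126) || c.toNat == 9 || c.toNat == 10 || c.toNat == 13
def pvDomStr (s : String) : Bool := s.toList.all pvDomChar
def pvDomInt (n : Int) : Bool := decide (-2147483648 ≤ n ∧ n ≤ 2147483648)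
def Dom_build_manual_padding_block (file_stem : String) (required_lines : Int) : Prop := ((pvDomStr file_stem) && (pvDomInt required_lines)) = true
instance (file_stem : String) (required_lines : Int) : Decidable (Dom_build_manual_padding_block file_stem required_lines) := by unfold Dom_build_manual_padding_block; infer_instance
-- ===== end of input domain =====

-- B computes the needed entry count in closed form and builds the block once, instead of A's
-- grow-by-one rebuild-and-recount loop; the returned pair is identical (proved below).

-- ===== PORT A =====
-- module helper count_text_lines (ported on List Char; PySem.Chars are the string primitives)
def pvCountTextLines (content : List Char) : Int :=
  if content = [] then 0
  else (PySem.Chars.count content ['\n'] : Int) +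
    (if PySem.Chars.endswith content ['\n'] then 0 else 1)

-- module helper sanitize_identifier
def pvSanitizeIdentifier (value : List Char) : List Char :=
  let chars := value.map (fun c => if PySem.Chars.isalnum c then PySem.Chars.upperChar c else '_')
  let sanitized := PySem.Chars.stripChars chars ['_']
  if sanitized = [] then "CHATCODE".toList else sanitized

-- str.title(), ported by hand (exact on ASCII, where the cased characters are the letters):
-- a letter is uppercased after a non-letter and lowercased after a letter; other chars unchanged.
def pvTitleGo : Bool → List Char → List Char
  | _, [] => []
  | prev, c :: rest =>
    if PySem.Chars.isalpha c then
      (if prev then PySem.Chars.lowerChar c else PySem.Chars.upperChar c) :: pvTitleGo true rest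
    else c :: pvTitleGo false rest

def pvTitle (s : List Char) : List Char := pvTitleGo false s

-- f"  'manual_pad_{file_stem}_{n:04d}',"  (n ≥ 1 at every call, so {:04d} is zfill of str(n))
def pvEntry (fs : List Char) (n : Int) : List Char :=
  "  'manual_pad_".toList ++ fs ++ "_".toList ++
    PySem.Chars.zfill (PySem.Int.toChars n) 4 ++ "',".toList

-- the block_lines list literal
def pvBlockLines (symbol fname : List Char) (entries : List (List Char)) : List (List Char) :=
  [] :: ("export const ".toList ++ symbol ++ " = [".toList) :: (entries ++
    ["];".toList, [],
     "export function ".toList ++ fname ++ "() {".toList,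
     "  return ".toList ++ symbol ++ ".length;".toList,
     "}".toList])

-- "\n".join(block_lines)
def pvBlock (symbol fname : List Char) (entries : List (List Char)) : List Char :=
  PySem.Chars.join ['\n'] (pvBlockLines symbol fname entries)

-- supporting facts for the loop's termination argument (pvALoop cites pv_len_lt_countTextLines)
theorem pv_countgo_single (c : Char) : ∀ (fuel : Nat) (l : List Char) (acc : Nat),
    l.length ≤ fuel → PySem.Chars.count.go [c] fuel l acc = acc + l.count c := by
  intro fuel
  induction fuel with
  | zero => intro l acc h
            have : l = [] := by cases l <;> simp_all
            subst this; simp [PySem.Chars.count.go]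
  | succ n ih =>
    intro l acc h
    cases l with
    | nil => simp [PySem.Chars.count.go]
    | cons hd t =>
      simp only [PySem.Chars.count.go]
      by_cases hc : c = hd
      · subst hc
        rw [if_pos (by simp [List.isPrefixOf])]
        simp only [List.length_cons, List.length_nil, List.drop_succ_cons, List.drop_zero]
        rw [ih t (acc+1) (by simpa using h)]
        simp
        omega
      · rw [if_neg (by simp [List.isPrefixOf]; exact hc)]
        rw [ih t acc (by simpa using h)]
        simp [Ne.symm hc]

theorem pv_count_single (s : List Char) (c : Char) :
    PySem.Chars.count s [c] = s.count c := by
  simp [PySem.Chars.count, pv_countgo_single c s.length s 0 le_rfl]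

theorem pv_intercalate_single (c : Char) (a : List Char) (ps : List (List Char)) :
    List.intercalate [c] (a :: ps) = a ++ ps.flatMap (fun p => c :: p) := by
  induction ps generalizing a with
  | nil => simp [List.intercalate]
  | cons p ps ih =>
    cases ps with
    | nil => simp [List.intercalate]
    | cons p2 ps2 =>
      simp only [List.intercalate, List.intersperse_cons₂, List.flatten_cons] at ih ⊢
      simp [List.flatMap_cons]
      have h0 := ih []
      simpa [List.flatMap_cons] using h0

theorem pv_block_eq (symbol fname : List Char) (es : List (List Char)) :
    pvBlock symbol fname es =
      ((("export const ".toList ++ symbol ++ " = [".toList) :: es ++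
        ["];".toList, [],
         "export function ".toList ++ fname ++ "() {".toList,
         "  return ".toList ++ symbol ++ ".length;".toList]).flatMap (fun p => '\n' :: p))
      ++ ['\n', '}'] := by
  show List.intercalate ['\n'] (pvBlockLines symbol fname es) = _
  rw [pvBlockLines, pv_intercalate_single '\n' []]
  simp

theorem pv_count_block (symbol fname : List Char) (es : List (List Char)) :
    (pvBlock symbol fname es).count '\n' =
      6 + es.length + (es.map (List.count '\n')).sum
      + ("export const ".toList ++ symbol ++ " = [".toList).count '\n'
      + ("export function ".toList ++ fname ++ "() {".toList).count '\n'
      + ("  return ".toList ++ symbol ++ ".length;".toList).count '\n' := by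
  rw [pv_block_eq]
  simp only [List.flatMap_append, List.flatMap_cons, List.flatMap_nil, List.count_append,
    List.count_cons, List.count_flatMap, Function.comp_def]
  simp
  ring

theorem pv_block_ne_nil (symbol fname : List Char) (es : List (List Char)) :
    pvBlock symbol fname es ≠ [] := by
  rw [pv_block_eq]; simp

theorem pv_len_lt_countTextLines (symbol fname : List Char) (es : List (List Char)) :
    (es.length : Int) < pvCountTextLines (pvBlock symbol fname es) := by
  rw [pvCountTextLines, if_neg (pv_block_ne_nil symbol fname es), pv_count_single,
    pv_count_block]
  split_ifs <;> omega

-- the while loop of A: append one entry, rebuild the block, recount, stop when enough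
def pvALoop (fs : List Char) (required : Int) (symbol fname : List Char)
    (entries : List (List Char)) : List Char × Int :=
  let entries' := entries ++ [pvEntry fs ((entries.length : Int) + 1)]
  let block := pvBlock symbol fname entries'
  let cnt := pvCountTextLines block
  if required ≤ cnt then (block, cnt)
  else pvALoop fs required symbol fname entries'
termination_by (required - (entries.length : Int)).toNat
decreasing_by
  rename_i h
  simp only [cnt, block, entries'] at h
  have h1 := pv_len_lt_countTextLines symbol fname
    (entries ++ [pvEntry fs ((entries.length : Int) + 1)])
  simp only [List.length_append, List.length_cons, List.length_nil] at h1 ⊢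
  push_cast at h1 ⊢
  omega

def build_manual_padding_block (file_stem : String) (required_lines : Int) : String × Int :=
  if required_lines ≤ 0 then ("", 0)
  else
    let fs := file_stem.toList
    let symbol := "__CHATCODE_MANUAL_PAD_".toList ++ pvSanitizeIdentifier fs
    let fname := "getChatcodeManualPadSize".toList ++
      PySem.Chars.replace (pvTitle (pvSanitizeIdentifier fs)) ['_'] []
    let r := pvALoop fs required_lines symbol fname []
    (String.ofList r.1, r.2)

-- ===== PORT B =====
def build_manual_padding_block_alt (file_stem : String) (required_lines : Int) : String × Int :=
  if required_lines ≤ 0 then ("", 0)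
  else
    let fs := file_stem.toList
    let ident := pvSanitizeIdentifier fs
    let symbol := "__CHATCODE_MANUAL_PAD_".toList ++ ident
    let fname := "getChatcodeManualPadSize".toList ++
      PySem.Chars.replace (pvTitle ident) ['_'] []
    -- each entry line spans 1 + (newlines embedded via file_stem) text lines
    let per : Int := (PySem.Chars.count fs ['\n'] : Int) + 1
    let k : Int := max 1 (-(PySem.Int.floordiv (7 - required_lines) per))
    let entries := (PySem.List.pyRange 1 (k + 1)).map (fun i => pvEntry fs i)
    (String.ofList (pvBlock symbol fname entries), 7 + k * per)

-- ===== PRECONDITION & SPEC =====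
def Spec_build_manual_padding_block (file_stem : String) (required_lines : Int) (out : String × Int) : Prop := out = build_manual_padding_block_alt file_stem required_lines
instance (file_stem : String) (required_lines : Int) (out : String × Int) : Decidable (Spec_build_manual_padding_block file_stem required_lines out) := by unfold Spec_build_manual_padding_block; infer_instance

-- ===== CLAIM (what is proved, stated in full; the proofs are below) =====
def Claim_equal_build_manual_padding_block : Prop := ∀ (file_stem : String) (required_lines : Int), Dom_build_manual_padding_block file_stem required_lines → Spec_build_manual_padding_block file_stem required_lines (build_manual_padding_block file_stem required_lines)

-- ===== LEMMAS AND PROOFS =====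

-- no character produced into the symbol / function name is a newline
theorem pv_le_toNat {a c : Char} (h : a ≤ c) : a.toNat ≤ c.toNat := by
  rw [Char.le_def] at h
  exact UInt32.le_iff_toNat_le.mp h

theorem pv_upperChar_ne_newline (c : Char) (h : PySem.Chars.isalnum c = true) :
    PySem.Chars.upperChar c ≠ '\n' := by
  rw [PySem.Chars.upperChar]
  split_ifs with hl
  · rw [PySem.Chars.islower] at hl
    simp only [Bool.and_eq_true, decide_eq_true_eq] at hl
    have h1 := pv_le_toNat hl.1
    have h2 := pv_le_toNat hl.2
    rw [show ('a').toNat = 97 from rfl] at h1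
    rw [show ('z').toNat = 122 from rfl] at h2
    intro hc
    have h3 := congrArg Char.toNat hc
    rw [Char.toNat_ofNat, if_pos (Or.inl (by omega)),
      show ('\n').toNat = 10 from rfl] at h3
    omega
  · rw [PySem.Chars.isalnum, PySem.Chars.isalpha, PySem.Chars.isupper, PySem.Chars.islower,
      PySem.Chars.isdigit] at h
    simp only [Bool.or_eq_true, Bool.and_eq_true, decide_eq_true_eq] at h
    intro hc; subst hc
    rcases h with (⟨h1, _⟩ | ⟨h1, _⟩) | ⟨h1, _⟩ <;> exact absurd h1 (by decide)

theorem pv_lowerChar_ne_newline (c : Char) (h : PySem.Chars.isalpha c = true) :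
    PySem.Chars.lowerChar c ≠ '\n' := by
  rw [PySem.Chars.lowerChar]
  split_ifs with hl
  · rw [PySem.Chars.isupper] at hl
    simp only [Bool.and_eq_true, decide_eq_true_eq] at hl
    have h1 := pv_le_toNat hl.1
    have h2 := pv_le_toNat hl.2
    rw [show ('A').toNat = 65 from rfl] at h1
    rw [show ('Z').toNat = 90 from rfl] at h2
    intro hc
    have h3 := congrArg Char.toNat hc
    rw [Char.toNat_ofNat, if_pos (Or.inl (by omega)),
      show ('\n').toNat = 10 from rfl] at h3
    omega
  · rw [PySem.Chars.isalpha, PySem.Chars.isupper, PySem.Chars.islower] at h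
    simp only [Bool.or_eq_true, Bool.and_eq_true, decide_eq_true_eq] at h
    intro hc; subst hc
    rcases h with ⟨h1, _⟩ | ⟨h1, _⟩ <;> exact absurd h1 (by decide)

theorem pv_sanitize_no_newline (value : List Char) :
    '\n' ∉ pvSanitizeIdentifier value := by
  rw [pvSanitizeIdentifier]
  split_ifs with h
  · decide
  · intro hmem
    rw [PySem.Chars.stripChars] at hmem
    rw [List.mem_reverse] at hmem
    have hmem2 := (List.dropWhile_sublist _).mem hmem
    rw [List.mem_reverse] at hmem2
    have hmem3 := (List.dropWhile_sublist _).mem hmem2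
    rcases List.mem_map.mp hmem3 with ⟨c, _, hc⟩
    by_cases ha : PySem.Chars.isalnum c = true
    · rw [if_pos ha] at hc
      exact pv_upperChar_ne_newline c ha hc
    · rw [if_neg ha] at hc
      exact absurd hc (by decide)

theorem pv_title_no_newline (s : List Char) : ∀ (prev : Bool), '\n' ∉ s →
    '\n' ∉ pvTitleGo prev s := by
  induction s with
  | nil => intro prev h; simp [pvTitleGo]
  | cons c rest ih =>
    intro prev h
    rw [pvTitleGo]
    have hc : c ≠ '\n' := fun hh => h (hh ▸ List.mem_cons_self ..)
    have ht : '\n' ∉ rest := fun hh => h (List.mem_cons_of_mem _ hh)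
    by_cases ha : PySem.Chars.isalpha c = true
    · rw [if_pos ha]
      intro hmem
      rcases List.mem_cons.mp hmem with h1 | h1
      · cases prev with
        | true => exact pv_lowerChar_ne_newline c ha (by simpa using h1.symm)
        | false => exact pv_upperChar_ne_newline c (by simp [PySem.Chars.isalnum, ha]) (by simpa using h1.symm)
      · exact ih true ht h1
    · rw [if_neg ha]
      intro hmem
      rcases List.mem_cons.mp hmem with h1 | h1
      · exact hc h1.symm
      · exact ih false ht h1

theorem pv_mem_replace_go (old new : List Char) : ∀ (fuel : Nat) (l acc : List Char) (c : Char),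
    c ∈ PySem.Chars.replace.go old new fuel l acc → c ∈ acc ∨ c ∈ l ∨ c ∈ new := by
  intro fuel
  induction fuel with
  | zero =>
    intro l acc c h
    rw [PySem.Chars.replace.go] at h
    rcases List.mem_append.mp h with h1 | h1
    · exact Or.inl (List.mem_reverse.mp h1)
    · exact Or.inr (Or.inl h1)
  | succ f ih =>
    intro l acc c h
    cases l with
    | nil =>
      simp only [PySem.Chars.replace.go] at h
      exact Or.inl (List.mem_reverse.mp h)
    | cons hd t =>
      rw [PySem.Chars.replace.go] at h
      split_ifs at h with hp
      · rcases ih _ _ _ h with h1 | h1 | h1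
        · rcases List.mem_append.mp h1 with h2 | h2
          · exact Or.inr (Or.inr (List.mem_reverse.mp h2))
          · exact Or.inl h2
        · exact Or.inr (Or.inl (List.mem_of_mem_drop h1))
        · exact Or.inr (Or.inr h1)
      · rcases ih _ _ _ h with h1 | h1 | h1
        · rcases List.mem_cons.mp h1 with h2 | h2
          · exact Or.inr (Or.inl (h2 ▸ List.mem_cons_self ..))
          · exact Or.inl h2
        · exact Or.inr (Or.inl (List.mem_cons_of_mem _ h1))
        · exact Or.inr (Or.inr h1)

theorem pv_replace_no_newline (s : List Char) (h : '\n' ∉ s) :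
    '\n' ∉ PySem.Chars.replace s ['_'] [] := by
  rw [PySem.Chars.replace]
  simp only [List.isEmpty_cons, if_false, Bool.false_eq_true]
  intro hmem
  rcases pv_mem_replace_go _ _ _ _ _ _ hmem with h1 | h1 | h1
  · simp at h1
  · exact h h1
  · simp at h1

theorem pv_symbol_no_newline (fs : List Char) :
    ("__CHATCODE_MANUAL_PAD_".toList ++ pvSanitizeIdentifier fs).count '\n' = 0 := by
  rw [List.count_append]
  rw [List.count_eq_zero.mpr (pv_sanitize_no_newline fs)]
  decide

theorem pv_fname_no_newline (fs : List Char) :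
    ("getChatcodeManualPadSize".toList ++
      PySem.Chars.replace (pvTitle (pvSanitizeIdentifier fs)) ['_'] []).count '\n' = 0 := by
  rw [List.count_append]
  rw [List.count_eq_zero.mpr (pv_replace_no_newline _
    (by rw [pvTitle]; exact pv_title_no_newline _ false (pv_sanitize_no_newline fs)))]
  decide

-- the number printed into an entry contains no newline
theorem pv_digitChar_ne_newline (m : Nat) : Nat.digitChar m ≠ '\n' := by
  match m with
  | 0 => decide
  | 1 => decide
  | 2 => decide
  | 3 => decide
  | 4 => decide
  | 5 => decide
  | 6 => decide
  | 7 => decide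
  | 8 => decide
  | 9 => decide
  | 10 => decide
  | 11 => decide
  | 12 => decide
  | 13 => decide
  | 14 => decide
  | 15 => decide
  | (n+16) =>
    have h : Nat.digitChar (n+16) = '*' := by
      rw [Nat.digitChar.eq_def, if_neg (by omega : ¬ (n + 16 = 0)), if_neg (by omega : ¬ (n + 16 = 1)), if_neg (by omega : ¬ (n + 16 = 2)), if_neg (by omega : ¬ (n + 16 = 3)), if_neg (by omega : ¬ (n + 16 = 4)), if_neg (by omega : ¬ (n + 16 = 5)), if_neg (by omega : ¬ (n + 16 = 6)), if_neg (by omega : ¬ (n + 16 = 7)), if_neg (by omega : ¬ (n + 16 = 8)), if_neg (by omega : ¬ (n + 16 = 9)), if_neg (by omega : ¬ (n + 16 = 10)), if_neg (by omega : ¬ (n + 16 = 11)), if_neg (by omega : ¬ (n + 16 = 12)), if_neg (by omega : ¬ (n + 16 = 13)), if_neg (by omega : ¬ (n + 16 = 14)), if_neg (by omega : ¬ (n + 16 = 15))]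
    rw [h]; decide

theorem pv_mem_toDigitsCore (b : Nat) : ∀ (fuel n : Nat) (ds : List Char) (c : Char),
    c ∈ Nat.toDigitsCore b fuel n ds → c ∈ ds ∨ ∃ m, c = Nat.digitChar m := by
  intro fuel
  induction fuel with
  | zero => intro n ds c h; exact Or.inl (by simpa [Nat.toDigitsCore] using h)
  | succ f ih =>
    intro n ds c h
    rw [Nat.toDigitsCore] at h
    by_cases h0 : n / b = 0
    · rw [if_pos h0] at h
      rcases List.mem_cons.mp h with h1 | h1
      · exact Or.inr ⟨_, h1⟩
      · exact Or.inl h1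
    · rw [if_neg h0] at h
      rcases ih _ _ _ h with h1 | h1
      · rcases List.mem_cons.mp h1 with h2 | h2
        · exact Or.inr ⟨_, h2⟩
        · exact Or.inl h2
      · exact Or.inr h1

theorem pv_count_toChars (n : Int) : (PySem.Int.toChars n).count '\n' = 0 := by
  have hd : ∀ k : Nat, (Nat.toDigits 10 k).count '\n' = 0 := by
    intro k
    rw [List.count_eq_zero]
    intro hmem
    rcases pv_mem_toDigitsCore 10 _ _ _ _ hmem with h | ⟨m, hm⟩
    · simp at h
    · exact pv_digitChar_ne_newline m hm.symm
  rw [PySem.Int.toChars]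
  split_ifs with h
  · simp [hd]
  · exact hd _

theorem pv_count_zfill (cs : List Char) (w : Int) :
    (PySem.Chars.zfill cs w).count '\n' = cs.count '\n' := by
  rw [PySem.Chars.zfill.eq_def]
  split
  · rfl
  · split
    · split_ifs with h2
      · simp [List.count_cons, List.count_append, List.count_replicate]
      · simp [List.count_cons, List.count_append, List.count_replicate]
    · simp [List.count_replicate]

theorem pv_count_entry (fs : List Char) (n : Int) :
    (pvEntry fs n).count '\n' = fs.count '\n' := by
  rw [pvEntry]
  simp [List.count_append, pv_count_zfill, pv_count_toChars]

-- the canonical entries list after m iterations of A's loop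
def pvCanon (fs : List Char) (m : Nat) : List (List Char) :=
  (List.range m).map (fun i => pvEntry fs ((i : Int) + 1))

theorem pv_canon_succ (fs : List Char) (m : Nat) :
    pvCanon fs (m + 1) = pvCanon fs m ++ [pvEntry fs ((m : Int) + 1)] := by
  simp [pvCanon, List.range_succ]

theorem pv_canon_length (fs : List Char) (m : Nat) : (pvCanon fs m).length = m := by
  simp [pvCanon]

theorem pv_canon_map_count (fs : List Char) (m : Nat) :
    (pvCanon fs m).map (List.count '\n') = List.replicate m (fs.count '\n') := by
  induction m with
  | zero => rfl
  | succ k ih =>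
    rw [pv_canon_succ, List.map_append, ih, List.replicate_succ']
    rw [List.map_singleton, pv_count_entry]

theorem pv_endswith_block (symbol fname : List Char) (es : List (List Char)) :
    PySem.Chars.endswith (pvBlock symbol fname es) ['\n'] = false := by
  rw [← Bool.not_eq_true, PySem.Chars.endswith_iff]
  intro h
  have h3 : ['}'] <:+ pvBlock symbol fname es := by
    rw [pv_block_eq, show (['\n', '}'] : List Char) = ['\n'] ++ ['}'] from rfl, ← List.append_assoc]
    exact ⟨_, rfl⟩
  rcases List.suffix_or_suffix_of_suffix h h3 with h4 | h4 <;>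
    obtain ⟨u, hu⟩ := h4 <;> cases u <;> simp_all


-- a block with m canonical entries spans exactly 7 + m*(1 + newlines-in-stem) text lines
set_option maxHeartbeats 1000000 in
theorem pv_cnt_canon (fs symbol fname : List Char)
    (hsym : symbol.count '\n' = 0) (hfn : fname.count '\n' = 0) (m : Nat) :
    pvCountTextLines (pvBlock symbol fname (pvCanon fs m)) =
      7 + (m : Int) * ((fs.count '\n' : Int) + 1) := by
  have hendsw := pv_endswith_block symbol fname (pvCanon fs m)
  have hne := pv_block_ne_nil symbol fname (pvCanon fs m)
  rw [pvCountTextLines, if_neg hne, hendsw, pv_count_single, pv_count_block,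
    pv_canon_map_count, List.sum_replicate, pv_canon_length]
  simp only [List.count_append, hsym, hfn]
  have c1 : ("export const ".toList).count '\n' = 0 := by decide
  have c2 : (" = [".toList).count '\n' = 0 := by decide
  have c3 : ("export function ".toList).count '\n' = 0 := by decide
  have c4 : ("() {".toList).count '\n' = 0 := by decide
  have c5 : ("  return ".toList).count '\n' = 0 := by decide
  have c6 : (".length;".toList).count '\n' = 0 := by decide
  rw [c1, c2, c3, c4, c5, c6, smul_eq_mul]
  push_cast
  ring

-- A's loop, started from m canonical entries, stops at max (m+1) ⌈(required-7)/per⌉ entries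
theorem pv_aloop_spec (fs symbol fname : List Char)
    (hsym : symbol.count '\n' = 0) (hfn : fname.count '\n' = 0)
    (required : Int) (q : Int)
    (hq1 : (q - 1) * ((fs.count '\n' : Int) + 1) < required - 7)
    (hq2 : required - 7 ≤ q * ((fs.count '\n' : Int) + 1)) :
    ∀ m : Nat, pvALoop fs required symbol fname (pvCanon fs m) =
      (pvBlock symbol fname (pvCanon fs (max (m + 1) q.toNat)),
       7 + ((max (m + 1) q.toNat : Nat) : Int) * ((fs.count '\n' : Int) + 1)) := by
  set per : Int := (fs.count '\n' : Int) + 1 with hper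
  have hper0 : 0 < per := by positivity
  suffices H : ∀ (t m : Nat), q.toNat ≤ m + t →
      pvALoop fs required symbol fname (pvCanon fs m) =
        (pvBlock symbol fname (pvCanon fs (max (m + 1) q.toNat)),
         7 + ((max (m + 1) q.toNat : Nat) : Int) * per) by
    intro m; exact H q.toNat m (by omega)
  intro t
  induction t with
  | zero =>
    intro m h
    rw [pvALoop]
    have hen : pvCanon fs m ++ [pvEntry fs (((pvCanon fs m).length : Int) + 1)] =
        pvCanon fs (m + 1) := by
      rw [pv_canon_length, pv_canon_succ]
    rw [hen, pv_cnt_canon fs symbol fname hsym hfn (m + 1)]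
    have hq : q ≤ ((m + 1 : Nat) : Int) := by push_cast; omega
    have hstop : required ≤ 7 + ((m + 1 : Nat) : Int) * per := by
      have hmono : q * per ≤ ((m + 1 : Nat) : Int) * per :=
        mul_le_mul_of_nonneg_right hq (le_of_lt hper0)
      linarith
    rw [if_pos hstop]
    have hmax : max (m + 1) q.toNat = m + 1 := by omega
    rw [hmax]
  | succ t ih =>
    intro m h
    rw [pvALoop]
    have hen : pvCanon fs m ++ [pvEntry fs (((pvCanon fs m).length : Int) + 1)] =
        pvCanon fs (m + 1) := by
      rw [pv_canon_length, pv_canon_succ]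
    rw [hen, pv_cnt_canon fs symbol fname hsym hfn (m + 1)]
    by_cases hstop : required ≤ 7 + ((m + 1 : Nat) : Int) * per
    · rw [if_pos hstop]
      have hqle : q ≤ ((m : Int) + 1) := by
        by_contra hqc
        have hqc' := not_le.mp hqc
        have hmono : ((m : Int) + 1) * per ≤ (q - 1) * per :=
          mul_le_mul_of_nonneg_right (by omega) (le_of_lt hper0)
        push_cast at hstop
        linarith
      have hmax : max (m + 1) q.toNat = m + 1 := by omega
      rw [hmax]
    · rw [if_neg hstop]
      rw [ih (m + 1) (by omega)]
      have hqgt : ((m : Int) + 1) < q := by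
        by_contra hqc
        have hqc' := not_lt.mp hqc
        have hmono : q * per ≤ ((m : Int) + 1) * per :=
          mul_le_mul_of_nonneg_right hqc' (le_of_lt hper0)
        exact hstop (by push_cast; linarith)
      have hmax : max (m + 1 + 1) q.toNat = max (m + 1) q.toNat := by omega
      rw [hmax]

-- list(range(1, n+1)) mapped to entries is exactly the canonical entries list
theorem pv_pyRange_map (fs : List Char) (n : Nat) :
    (PySem.List.pyRange 1 ((n : Int) + 1)).map (fun i => pvEntry fs i) = pvCanon fs n := by
  induction n with
  | zero =>
    have h0 : PySem.List.pyRange 1 ((0 : Int) + 1) = [] := by decide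
    rw [show (((0:Nat) : Int) + 1) = (0:Int) + 1 by norm_num, h0]
    rfl
  | succ k ih =>
    rw [show (((k + 1 : Nat) : Int) + 1) = ((k : Int) + 1) + 1 by push_cast; ring]
    rw [PySem.List.pyRange_one_succ_right (by omega), List.map_append, ih, pv_canon_succ]
    rfl

theorem pv_main (file_stem : String) (required_lines : Int) :
    build_manual_padding_block file_stem required_lines =
      build_manual_padding_block_alt file_stem required_lines := by
  by_cases hneg : required_lines ≤ 0
  · simp only [build_manual_padding_block, build_manual_padding_block_alt, if_pos hneg]
  · simp only [build_manual_padding_block, build_manual_padding_block_alt, if_neg hneg]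
    simp only [pv_count_single]
    have hper0 : (0:Int) < ((file_stem.toList.count '\n' : Int) + 1) := by positivity
    have h77 : (7 : Int) - required_lines = -(required_lines - 7) := by ring
    rw [h77]
    obtain ⟨hq1, hq2⟩ := (PySem.Int.neg_floordiv_neg_eq_iff_of_pos hper0).mp
      (rfl : -(PySem.Int.floordiv (-(required_lines - 7)) ((file_stem.toList.count '\n' : Int) + 1)) = _)
    have hsym := pv_symbol_no_newline file_stem.toList
    have hfn := pv_fname_no_newline file_stem.toList
    have h0 : pvCanon file_stem.toList 0 = [] := rfl
    rw [← h0]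
    rw [pv_aloop_spec file_stem.toList _ _ hsym hfn required_lines _ hq1 hq2 0]
    set q : Int := -(PySem.Int.floordiv (-(required_lines - 7)) ((file_stem.toList.count '\n' : Int) + 1)) with hqdef
    have hkto : ((max 1 q).toNat : Int) = max 1 q := Int.toNat_of_nonneg (by
      have := le_max_left (1:Int) q; omega)
    have hmax0 : max (0 + 1) q.toNat = (max 1 q).toNat := by omega
    rw [hmax0]
    rw [show max (1:Int) q + 1 = ((max 1 q).toNat : Int) + 1 by rw [hkto]]
    rw [pv_pyRange_map file_stem.toList ((max 1 q).toNat)]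
    rw [hkto]

-- ===== VERDICT (by name: the statement is the Claim_ definition above) =====
theorem build_manual_padding_block_spec : Claim_equal_build_manual_padding_block := by
  intro file_stem required_lines _
  unfold Spec_build_manual_padding_block
  exact pv_main file_stem required_lines
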